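-- pv_equiv track=rewrite | github.com/ImranZafar28/CodeSignal-Arcade-Intro | Dark Wilderness/longestDigitsPrefix.py | solution
-- ===== SOURCE A (Python) =====
-- def solution(inputString):
--     import string
--     d = string.digits
--     prefix = ''
--     for i in range(len(inputString)):
--         if inputString[i] not in d:
--             return inputString[:i]
--         elif inputString[i] in d:
--             continue
--     return inputString
-- ===== SOURCE B (Python) =====
-- def solution(inputString):
--     import string
--     out = []
--     for c in inputString:
--         if c not in string.digits:
--             break
--         out.append(c)
--     return ''.join(out)
-- ===== Notes on version B (the rewrite author's own statement) =====
-- stated objective: simpler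
-- what changed: B streams over characters accumulating the digit prefix and breaking at the first non-digit, instead of A's index loop that tests s[i] and returns a slice s[:i]; no indices or slicing at all.
import Mathlib
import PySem

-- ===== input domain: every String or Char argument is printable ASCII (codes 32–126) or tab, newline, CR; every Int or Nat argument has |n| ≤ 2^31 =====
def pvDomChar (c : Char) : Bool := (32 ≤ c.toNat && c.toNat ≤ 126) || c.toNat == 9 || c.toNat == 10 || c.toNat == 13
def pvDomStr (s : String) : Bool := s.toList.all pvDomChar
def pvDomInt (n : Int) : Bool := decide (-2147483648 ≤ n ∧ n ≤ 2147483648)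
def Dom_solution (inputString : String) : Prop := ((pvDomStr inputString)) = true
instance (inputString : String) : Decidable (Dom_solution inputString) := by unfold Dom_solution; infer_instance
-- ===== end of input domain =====

-- B replaces A's index loop (test s[i], return slice s[:i]) by a single char stream
-- that accumulates the digit prefix and breaks at the first non-digit (simpler).

-- ===== PORT A =====
-- string.digits
def pvDigits : List Char := "0123456789".toList

-- for i in range(len(inputString)): if s[i] not in d: return s[:i] elif in d: continue; return s
def solLoopA (orig : List Char) (i : Nat) : List Char :=
  if h : i < orig.length then
    if orig[i] ∈ pvDigits then solLoopA orig (i + 1)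
    else orig.take i          -- inputString[:i], i ≥ 0 so slice = take
  else orig
termination_by orig.length - i

def solution (inputString : String) : String :=
  String.mk (solLoopA inputString.toList 0)

-- ===== PORT B =====
-- for c in s: if c not in digits: break; out.append(c); return ''.join(out)
def solLoopB : List Char → List Char
  | [] => []
  | c :: cs => if c ∈ pvDigits then c :: solLoopB cs else []

def solution_alt (inputString : String) : String :=
  String.mk (solLoopB inputString.toList)

-- ===== PRECONDITION & SPEC =====
def Spec_solution (inputString : String) (out : String) : Prop := out = solution_alt inputString
instance (inputString : String) (out : String) : Decidable (Spec_solution inputString out) := by unfold Spec_solution; infer_instance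

-- ===== CLAIM (what is proved, stated in full; the proofs are below) =====
def Claim_equal_solution : Prop := ∀ (inputString : String), Dom_solution inputString → Spec_solution inputString (solution inputString)

-- ===== LEMMAS AND PROOFS =====
theorem solLoopA_eq (orig : List Char) (i : Nat) :
    solLoopA orig i = orig.take i ++ solLoopB (orig.drop i) := by
  fun_induction solLoopA orig i with
  | case1 i h hd ih =>
      rw [ih]
      have hget : orig.drop i = orig[i] :: orig.drop (i + 1) :=
        (List.drop_eq_getElem_cons h)
      rw [hget, solLoopB, if_pos hd]
      simp only [List.take_add_one, List.getElem?_eq_getElem h, Option.toList_some,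
        List.append_assoc, List.singleton_append]
  | case2 i h hd =>
      have hget : orig.drop i = orig[i] :: orig.drop (i + 1) :=
        (List.drop_eq_getElem_cons h)
      rw [hget, solLoopB, if_neg hd]
      simp
  | case3 i h =>
      have : orig.length ≤ i := Nat.le_of_not_lt h
      simp [List.take_of_length_le this, List.drop_of_length_le this, solLoopB]

-- ===== VERDICT (by name: the statement is the Claim_ definition above) =====
theorem solution_spec : Claim_equal_solution := by
  intro s _
  unfold Spec_solution solution solution_alt
  rw [solLoopA_eq]
  simp
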